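-- pv_equiv track=rewrite | github.com/gurramkshethra-droid/Early_strength_discovery | app.py | build_quiz_profile
-- ===== SOURCE A (Python) =====
-- def build_quiz_profile(answers):
--     yes_ids = {question_id for question_id, value in answers.items() if value == "yes"}
--
--     interests = []
--     if {"q1", "q6", "q11"} & yes_ids:
--         interests.append("technology")
--     if {"q4", "q12"} & yes_ids:
--         interests.append("design")
--     if "q5" in yes_ids:
--         interests.append("health")
--     if {"q2", "q10"} & yes_ids:
--         interests.append("creative")
--     if {"q3", "q7"} & yes_ids:
--         interests.append("teaching")
--     if "q9" in yes_ids: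
--         interests.append("government")
--
--     skills = []
--     if {"q1", "q6"} & yes_ids:
--         skills.append("analysis")
--     if {"q4", "q12"} & yes_ids:
--         skills.append("visual-design")
--     if {"q3", "q7"} & yes_ids:
--         skills.append("communication")
--     if {"q8", "q11"} & yes_ids:
--         skills.append("teamwork")
--     if "q10" in yes_ids:
--         skills.append("innovation")
--
--     return {
--         "interest": ", ".join(interests) if interests else "general",
--         "skill": ", ".join(skills) if skills else "general",
--         "education": "Not provided (quiz mode)",
--     }
-- ===== SOURCE B (Python) =====
-- # Inverted index: each question maps to the labels it triggers; one pass over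
-- # the answers accumulates triggered labels, then the fixed label orders are filtered.
-- QUESTION_LABELS = {
--     "q1": ["technology", "analysis"],
--     "q2": ["creative"],
--     "q3": ["teaching", "communication"],
--     "q4": ["design", "visual-design"],
--     "q5": ["health"],
--     "q6": ["technology", "analysis"],
--     "q7": ["teaching", "communication"],
--     "q8": ["teamwork"],
--     "q9": ["government"],
--     "q10": ["creative", "innovation"],
--     "q11": ["technology", "teamwork"],
--     "q12": ["design", "visual-design"],
-- }
--
-- INTEREST_ORDER = ["technology", "design", "health", "creative", "teaching", "government"]
-- SKILL_ORDER = ["analysis", "visual-design", "communication", "teamwork", "innovation"]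
--
--
-- def build_quiz_profile(answers):
--     hit = set()
--     for question_id, value in answers.items():
--         if value == "yes":
--             hit.update(QUESTION_LABELS.get(question_id, []))
--     interests = [label for label in INTEREST_ORDER if label in hit]
--     skills = [label for label in SKILL_ORDER if label in hit]
--     return {
--         "interest": ", ".join(interests) or "general",
--         "skill": ", ".join(skills) or "general",
--         "education": "Not provided (quiz mode)",
--     }
-- ===== Notes on version B (the rewrite author's own statement) =====
-- stated objective: alternative
-- what changed: Inverts the classifier: instead of building a yes-set and testing eleven trigger-set intersections, B uses a question-to-labels inverted index, accumulates triggered labels in one pass over the answers, and filters the fixed label orders by membership.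
import Mathlib
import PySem

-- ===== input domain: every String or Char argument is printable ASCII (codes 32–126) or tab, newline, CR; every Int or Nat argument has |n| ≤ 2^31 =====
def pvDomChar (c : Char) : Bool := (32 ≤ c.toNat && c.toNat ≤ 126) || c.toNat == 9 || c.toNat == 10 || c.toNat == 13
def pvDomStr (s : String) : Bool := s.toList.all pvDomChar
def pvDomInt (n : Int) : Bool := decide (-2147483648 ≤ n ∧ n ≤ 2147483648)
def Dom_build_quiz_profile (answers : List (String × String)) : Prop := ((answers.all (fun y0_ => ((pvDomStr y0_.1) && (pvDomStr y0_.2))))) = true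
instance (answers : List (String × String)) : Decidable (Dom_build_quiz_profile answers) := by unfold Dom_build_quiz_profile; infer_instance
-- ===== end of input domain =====

-- B replaces A's yes-set + eleven trigger-set intersections with an inverted question->labels index accumulated in one pass, then filters fixed label orders (objective: alternative).


-- ===== PORT A =====
def build_quiz_profile (answers : List (String × String)) : List (String × String) :=
  let yes_ids : PySem.Set String :=
    PySem.Set.ofList ((answers.filter (fun p => p.2 == "yes")).map (fun p => p.1))
  let interests : List String := []
  let interests := if !(PySem.Set.inter (PySem.Set.ofList ["q1", "q6", "q11"]) yes_ids).isEmpty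
    then interests ++ ["technology"] else interests
  let interests := if !(PySem.Set.inter (PySem.Set.ofList ["q4", "q12"]) yes_ids).isEmpty
    then interests ++ ["design"] else interests
  let interests := if PySem.Set.contains yes_ids "q5"
    then interests ++ ["health"] else interests
  let interests := if !(PySem.Set.inter (PySem.Set.ofList ["q2", "q10"]) yes_ids).isEmpty
    then interests ++ ["creative"] else interests
  let interests := if !(PySem.Set.inter (PySem.Set.ofList ["q3", "q7"]) yes_ids).isEmpty
    then interests ++ ["teaching"] else interests
  let interests := if PySem.Set.contains yes_ids "q9"
    then interests ++ ["government"] else interests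
  let skills : List String := []
  let skills := if !(PySem.Set.inter (PySem.Set.ofList ["q1", "q6"]) yes_ids).isEmpty
    then skills ++ ["analysis"] else skills
  let skills := if !(PySem.Set.inter (PySem.Set.ofList ["q4", "q12"]) yes_ids).isEmpty
    then skills ++ ["visual-design"] else skills
  let skills := if !(PySem.Set.inter (PySem.Set.ofList ["q3", "q7"]) yes_ids).isEmpty
    then skills ++ ["communication"] else skills
  let skills := if !(PySem.Set.inter (PySem.Set.ofList ["q8", "q11"]) yes_ids).isEmpty
    then skills ++ ["teamwork"] else skills
  let skills := if PySem.Set.contains yes_ids "q10"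
    then skills ++ ["innovation"] else skills
  [("interest", if !interests.isEmpty then PySem.Str.join ", " interests else "general"),
   ("skill", if !skills.isEmpty then PySem.Str.join ", " skills else "general"),
   ("education", "Not provided (quiz mode)")]

-- ===== PORT B =====
def quizQuestionLabels : PySem.Dict String (List String) :=
  PySem.Dict.ofList
    [("q1", ["technology", "analysis"]),
     ("q2", ["creative"]),
     ("q3", ["teaching", "communication"]),
     ("q4", ["design", "visual-design"]),
     ("q5", ["health"]),
     ("q6", ["technology", "analysis"]),
     ("q7", ["teaching", "communication"]),
     ("q8", ["teamwork"]),
     ("q9", ["government"]),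
     ("q10", ["creative", "innovation"]),
     ("q11", ["technology", "teamwork"]),
     ("q12", ["design", "visual-design"])]

def quizInterestOrder : List String :=
  ["technology", "design", "health", "creative", "teaching", "government"]

def quizSkillOrder : List String :=
  ["analysis", "visual-design", "communication", "teamwork", "innovation"]

def build_quiz_profile_alt (answers : List (String × String)) : List (String × String) :=
  let hit : PySem.Set String :=
    answers.foldl
      (fun s p =>
        if p.2 == "yes" then PySem.Set.update s (PySem.Dict.getD quizQuestionLabels p.1 []) else s)
      PySem.Set.empty
  let interests := quizInterestOrder.filter (fun label => PySem.Set.contains hit label)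
  let skills := quizSkillOrder.filter (fun label => PySem.Set.contains hit label)
  [("interest", if !interests.isEmpty then PySem.Str.join ", " interests else "general"),
   ("skill", if !skills.isEmpty then PySem.Str.join ", " skills else "general"),
   ("education", "Not provided (quiz mode)")]

-- ===== PRECONDITION & SPEC =====
def Spec_build_quiz_profile (answers : List (String × String)) (out : List (String × String)) : Prop := out = build_quiz_profile_alt answers
instance (answers : List (String × String)) (out : List (String × String)) : Decidable (Spec_build_quiz_profile answers out) := by unfold Spec_build_quiz_profile; infer_instance

-- ===== CLAIM (what is proved, stated in full; the proofs are below) =====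
def Claim_equal_build_quiz_profile : Prop := ∀ (answers : List (String × String)), Dom_build_quiz_profile answers → Spec_build_quiz_profile answers (build_quiz_profile answers)

-- ===== LEMMAS AND PROOFS =====

-- B's accumulator set: the labels of every yes-answered question.
def quizHit (answers : List (String × String)) : PySem.Set String :=
  answers.foldl
    (fun s p =>
      if p.2 == "yes" then PySem.Set.update s (PySem.Dict.getD quizQuestionLabels p.1 []) else s)
    PySem.Set.empty

-- Membership in B's accumulated set, characterised over the input list.
lemma mem_quizHit_foldl (answers : List (String × String)) (s : PySem.Set String) (l : String) :
    (l ∈ answers.foldl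
      (fun s p =>
        if p.2 == "yes" then PySem.Set.update s (PySem.Dict.getD quizQuestionLabels p.1 []) else s) s)
    ↔ l ∈ s ∨ ∃ p ∈ answers, p.2 = "yes" ∧ l ∈ PySem.Dict.getD quizQuestionLabels p.1 [] := by
  induction answers generalizing s with
  | nil => simp
  | cons p rest ih =>
    simp only [List.foldl_cons, List.mem_cons, ih]
    by_cases h : p.2 = "yes"
    · simp [h, PySem.Set.mem_update]
      try tauto
    · simp [h]
      try tauto

lemma mem_quizHit (answers : List (String × String)) (l : String) :
    l ∈ quizHit answers
    ↔ ∃ p ∈ answers, p.2 = "yes" ∧ l ∈ PySem.Dict.getD quizQuestionLabels p.1 [] := by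
  rw [quizHit, mem_quizHit_foldl]
  simp [PySem.Set.empty]

-- Membership in A's yes-set, characterised over the input list.
lemma mem_quizYes (answers : List (String × String)) (q : String) :
    q ∈ (answers.filter (fun p => p.2 == "yes")).map (fun p => p.1)
    ↔ ∃ p ∈ answers, p.2 = "yes" ∧ p.1 = q := by
  simp [List.mem_map, List.mem_filter]
  try tauto

-- The inverted index, read back: which questions carry a given label.
set_option maxHeartbeats 2000000 in
lemma quizLabels_mem (q l : String) :
    l ∈ PySem.Dict.getD quizQuestionLabels q []
    ↔ (q, l) ∈ [(("q1" : String), ("technology" : String)), ("q1", "analysis"),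
        ("q2", "creative"), ("q3", "teaching"), ("q3", "communication"),
        ("q4", "design"), ("q4", "visual-design"), ("q5", "health"),
        ("q6", "technology"), ("q6", "analysis"), ("q7", "teaching"),
        ("q7", "communication"), ("q8", "teamwork"), ("q9", "government"),
        ("q10", "creative"), ("q10", "innovation"), ("q11", "technology"),
        ("q11", "teamwork"), ("q12", "design"), ("q12", "visual-design")] := by
  simp only [quizQuestionLabels, PySem.Dict.ofList, PySem.Dict.update, List.foldl_cons,
    List.foldl_nil, PySem.Dict.getD_insert, PySem.Dict.getD_empty]
  split_ifs <;> simp_all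

-- Two labels triggered by the same questions are hit together.
lemma quiz_hit_congr (answers : List (String × String)) (l1 l2 : String) (T : List String)
    (h1 : ∀ q : String, l1 ∈ PySem.Dict.getD quizQuestionLabels q [] ↔ q ∈ T)
    (h2 : ∀ q : String, l2 ∈ PySem.Dict.getD quizQuestionLabels q [] ↔ q ∈ T) :
    PySem.Set.contains (quizHit answers) l1 = PySem.Set.contains (quizHit answers) l2 := by
  rw [Bool.eq_iff_iff]
  simp only [PySem.Set.contains_iff, mem_quizHit]
  constructor
  · rintro ⟨p, hp, hy, hl⟩; exact ⟨p, hp, hy, (h2 p.1).mpr ((h1 p.1).mp hl)⟩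
  · rintro ⟨p, hp, hy, hl⟩; exact ⟨p, hp, hy, (h1 p.1).mpr ((h2 p.1).mp hl)⟩

-- A's trigger condition for a label equals membership of that label in B's hit set.
lemma quiz_cond_eq (answers : List (String × String)) (l : String) (T : List String)
    (hT : ∀ q : String, l ∈ PySem.Dict.getD quizQuestionLabels q [] ↔ q ∈ T) :
    (!(PySem.Set.inter (PySem.Set.ofList T)
        (PySem.Set.ofList ((answers.filter (fun p => p.2 == "yes")).map (fun p => p.1)))).isEmpty)
    = PySem.Set.contains (quizHit answers) l := by
  rw [Bool.eq_iff_iff]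
  simp only [Bool.not_eq_true', List.isEmpty_eq_false_iff_exists_mem, PySem.Set.mem_inter,
    PySem.Set.mem_ofList, mem_quizYes, PySem.Set.contains_iff, mem_quizHit]
  constructor
  · rintro ⟨q, hqT, p, hp, hy, hq⟩
    exact ⟨p, hp, hy, (hT p.1).mpr (hq ▸ hqT)⟩
  · rintro ⟨p, hp, hy, hl⟩
    exact ⟨p.1, (hT p.1).mp hl, p, hp, hy, rfl⟩

-- A's single-question membership test equals membership of the label in B's hit set.
lemma quiz_contains_eq (answers : List (String × String)) (l q : String)
    (hT : ∀ q' : String, l ∈ PySem.Dict.getD quizQuestionLabels q' [] ↔ q' ∈ [q]) :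
    PySem.Set.contains
        (PySem.Set.ofList ((answers.filter (fun p => p.2 == "yes")).map (fun p => p.1))) q
    = PySem.Set.contains (quizHit answers) l := by
  rw [Bool.eq_iff_iff]
  simp only [PySem.Set.contains_iff, PySem.Set.mem_ofList, mem_quizYes, mem_quizHit]
  constructor
  · rintro ⟨p, hp, hy, hq⟩
    exact ⟨p, hp, hy, (hT p.1).mpr (by simp [hq])⟩
  · rintro ⟨p, hp, hy, hl⟩
    have := (hT p.1).mp hl
    simp at this
    exact ⟨p, hp, hy, this⟩

set_option maxHeartbeats 1000000 in
theorem build_quiz_profile_eq (answers : List (String × String)) :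
    build_quiz_profile answers = build_quiz_profile_alt answers := by
  unfold build_quiz_profile build_quiz_profile_alt quizInterestOrder quizSkillOrder
  simp only [List.filter_cons, List.filter_nil]
  rw [show (answers.foldl
      (fun s p =>
        if p.2 == "yes" then PySem.Set.update s (PySem.Dict.getD quizQuestionLabels p.1 []) else s)
      PySem.Set.empty) = quizHit answers from rfl]
  rw [quiz_cond_eq answers "technology" ["q1", "q6", "q11"] (by intro q; rw [quizLabels_mem]; simp; try tauto),
      quiz_cond_eq answers "design" ["q4", "q12"] (by intro q; rw [quizLabels_mem]; simp; try tauto),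
      quiz_contains_eq answers "health" "q5" (by intro q; rw [quizLabels_mem]; simp; try tauto),
      quiz_cond_eq answers "creative" ["q2", "q10"] (by intro q; rw [quizLabels_mem]; simp; try tauto),
      quiz_cond_eq answers "teaching" ["q3", "q7"] (by intro q; rw [quizLabels_mem]; simp; try tauto),
      quiz_contains_eq answers "government" "q9" (by intro q; rw [quizLabels_mem]; simp; try tauto),
      quiz_cond_eq answers "analysis" ["q1", "q6"] (by intro q; rw [quizLabels_mem]; simp; try tauto),
      quiz_cond_eq answers "teamwork" ["q8", "q11"] (by intro q; rw [quizLabels_mem]; simp; try tauto),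
      quiz_contains_eq answers "innovation" "q10" (by intro q; rw [quizLabels_mem]; simp; try tauto)]
  rw [quiz_hit_congr answers "visual-design" "design" ["q4", "q12"]
        (by intro q; rw [quizLabels_mem]; simp; try tauto)
        (by intro q; rw [quizLabels_mem]; simp; try tauto),
      quiz_hit_congr answers "communication" "teaching" ["q3", "q7"]
        (by intro q; rw [quizLabels_mem]; simp; try tauto)
        (by intro q; rw [quizLabels_mem]; simp; try tauto)]
  generalize PySem.Set.contains (quizHit answers) "technology" = b1
  generalize PySem.Set.contains (quizHit answers) "design" = b2
  generalize PySem.Set.contains (quizHit answers) "health" = b3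
  generalize PySem.Set.contains (quizHit answers) "creative" = b4
  generalize PySem.Set.contains (quizHit answers) "teaching" = b5
  generalize PySem.Set.contains (quizHit answers) "government" = b6
  generalize PySem.Set.contains (quizHit answers) "analysis" = b7
  generalize PySem.Set.contains (quizHit answers) "teamwork" = b8
  generalize PySem.Set.contains (quizHit answers) "innovation" = b9
  revert b1 b2 b3 b4 b5 b6 b7 b8 b9
  decide

-- ===== VERDICT (by name: the statement is the Claim_ definition above) =====
theorem build_quiz_profile_spec : Claim_equal_build_quiz_profile := by
  intro answers _
  unfold Spec_build_quiz_profile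
  exact build_quiz_profile_eq answers
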